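-- pv_equiv track=rewrite | github.com/Roxalis/short-python | find_three_double_letter.py | find_three_double_letter
-- ===== SOURCE A (Python) =====
-- def find_three_double_letter(word):
--     i = 0
--     s = ''
--     while i < len(word) - 1:
--         if word[i] == word[i + 1]:
--             s += '1'
--         else:
--             s += '0'
--         i += 1
--     if '10101' in s or '11101' in s or '10111' in s or '11111' in s:
--         return True
--     else:
--         return False
-- ===== SOURCE B (Python) =====
-- def find_three_double_letter(word):
--     chains = [0, 0]  # length of the run of spaced doubles ending at the last even/odd index
--     for i in range(len(word) - 1):
--         p = i & 1
--         chains[p] = chains[p] + 1 if word[i] == word[i + 1] else 0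
--         if chains[p] == 3:
--             return True
--     return False
-- ===== Notes on version B (the rewrite author's own statement) =====
-- stated objective: faster
-- what changed: A materialises a '0'/'1' marker string by repeated concatenation and searches it for four explicit 5-character patterns; B is a single streaming pass over the word with two O(1) run-length counters (one per index parity) that count consecutive doubles spaced two apart and return True as soon as a counter reaches 3 — no marker string, no pattern search, early exit.
import Mathlib
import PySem

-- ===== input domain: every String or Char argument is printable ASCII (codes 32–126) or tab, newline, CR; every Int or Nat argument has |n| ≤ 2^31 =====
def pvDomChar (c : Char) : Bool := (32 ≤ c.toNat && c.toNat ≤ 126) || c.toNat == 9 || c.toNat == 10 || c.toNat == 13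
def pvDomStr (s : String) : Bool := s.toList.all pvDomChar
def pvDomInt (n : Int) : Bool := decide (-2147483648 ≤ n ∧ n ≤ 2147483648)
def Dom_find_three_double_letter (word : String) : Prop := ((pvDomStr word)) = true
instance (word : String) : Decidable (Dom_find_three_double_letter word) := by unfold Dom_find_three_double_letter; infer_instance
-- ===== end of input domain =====

-- B replaces A's marker string (repeated concatenation + four 5-char substring searches) by one
-- streaming pass keeping two run-length counters of spaced doubles, with early exit (measured faster).

-- ===== PORT A =====
-- the while loop of A: i walks from 0 while i < len(word)-1, appending '1'/'0' to s
def ftdlLoop (w : List Char) (i : Nat) (s : List Char) : List Char :=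
  if h : i + 1 < w.length then
    ftdlLoop w (i + 1) (s ++ [if w.getD i ' ' == w.getD (i + 1) ' ' then '1' else '0'])
  else s
termination_by w.length - i
decreasing_by omega

def find_three_double_letter (word : String) : Bool :=
  let s := ftdlLoop word.toList 0 []
  if PySem.Chars.isIn "10101".toList s || PySem.Chars.isIn "11101".toList s
      || PySem.Chars.isIn "10111".toList s || PySem.Chars.isIn "11111".toList s then
    true
  else
    false

-- ===== PORT B =====
-- the for loop of Source B: chains[p] are the counters c0 (even parity) and c1 (odd parity)
def altLoop (w : List Char) (i : Nat) (c0 c1 : Nat) : Bool :=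
  if h : i + 1 < w.length then
    let c := if w.getD i ' ' == w.getD (i + 1) ' ' then (if i % 2 == 0 then c0 else c1) + 1 else 0
    if c == 3 then true
    else if i % 2 == 0 then altLoop w (i + 1) c c1 else altLoop w (i + 1) c0 c
  else false
termination_by w.length - i
decreasing_by all_goals omega

def find_three_double_letter_alt (word : String) : Bool :=
  altLoop word.toList 0 0 0

-- ===== PRECONDITION & SPEC =====
def Spec_find_three_double_letter (word : String) (out : Bool) : Prop := out = find_three_double_letter_alt word
instance (word : String) (out : Bool) : Decidable (Spec_find_three_double_letter word out) := by unfold Spec_find_three_double_letter; infer_instance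

-- ===== CLAIM (what is proved, stated in full; the proofs are below) =====
def Claim_equal_find_three_double_letter : Prop := ∀ (word : String), Dom_find_three_double_letter word → Spec_find_three_double_letter word (find_three_double_letter word)

-- ===== LEMMAS AND PROOFS =====

lemma if_bool (c : Bool) : (if c then true else false) = c := by cases c <;> rfl

-- pair-equality marker at index k
def pe (w : List Char) (k : Nat) : Bool := w.getD k ' ' == w.getD (k + 1) ' '

def gbit (b : Bool) : Char := if b then '1' else '0'

-- the loop builds the map of the marker function over range' i (len-1-i)
lemma ftdlLoop_eq (w : List Char) : ∀ (d i : Nat) (s : List Char), w.length - 1 - i = d →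
    ftdlLoop w i s
      = s ++ (List.range' i d).map (fun k => if w.getD k ' ' == w.getD (k + 1) ' ' then '1' else '0') := by
  intro d
  induction d with
  | zero =>
    intro i s hd
    rw [ftdlLoop, dif_neg (by omega)]
    simp
  | succ k ih =>
    intro i s hd
    rw [ftdlLoop, dif_pos (by omega)]
    rw [ih (i + 1) _ (by omega)]
    rw [List.range'_succ]
    simp

lemma map_gbit_eq_some_one {P : List Bool} {m : Nat} (h : (P.map gbit)[m]? = some '1') :
    P[m]? = some true := by
  rw [List.getElem?_map] at h
  cases hm : P[m]? with
  | none => rw [hm] at h; simp at h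
  | some b =>
    rw [hm] at h
    cases b
    · simp [gbit] at h
    · rfl

-- forward direction: any of the four patterns occurring forces a spaced triple of trues
lemma isIn_pattern_imp {P : List Bool} {t : List Char} (ht : t.length = 5)
    (h0 : t[0]? = some '1') (h2 : t[2]? = some '1') (h4 : t[4]? = some '1')
    (h : PySem.Chars.isIn t (P.map gbit) = true) :
    ∃ j, j + 5 ≤ P.length ∧ P[j]? = some true ∧ P[j + 2]? = some true ∧ P[j + 4]? = some true := by
  rw [PySem.Chars.isIn_iff_infix, List.infix_iff_getElem?] at h
  obtain ⟨k, hk, hall⟩ := h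
  rw [ht] at hk
  simp only [List.length_map] at hk
  refine ⟨k, by omega, ?_, ?_, ?_⟩
  · have hh := hall 0 (by omega)
    rw [show (0 : Nat) + k = k from by omega] at hh
    rw [List.getElem?_eq_getElem (by omega), Option.some_inj] at h0
    rw [h0] at hh
    exact map_gbit_eq_some_one hh
  · have := hall 2 (by omega)
    rw [show (2 : Nat) + k = k + 2 from by omega] at this
    apply map_gbit_eq_some_one
    rw [this]
    rw [List.getElem?_eq_getElem (by omega), Option.some_inj] at h2
    rw [h2]
  · have := hall 4 (by omega)
    rw [show (4 : Nat) + k = k + 4 from by omega] at this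
    apply map_gbit_eq_some_one
    rw [this]
    rw [List.getElem?_eq_getElem (by omega), Option.some_inj] at h4
    rw [h4]

-- backward direction: a spaced triple of trues yields the pattern with the two actual middle bits
lemma trip_isIn {P : List Bool} {j : Nat} (h5 : j + 5 ≤ P.length) (b1 b3 : Bool)
    (hb1 : P[j + 1]? = some b1) (hb3 : P[j + 3]? = some b3)
    (h0 : P[j]? = some true) (h2 : P[j + 2]? = some true) (h4 : P[j + 4]? = some true) :
    PySem.Chars.isIn ['1', gbit b1, '1', gbit b3, '1'] (P.map gbit) = true := by
  rw [PySem.Chars.isIn_iff_infix, List.infix_iff_getElem?]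
  refine ⟨j, by simp; omega, ?_⟩
  intro i hi
  simp only [List.length_cons, List.length_nil] at hi
  interval_cases i <;>
    simp [List.getElem?_map, Nat.add_comm, h0, h2, h4, hb1, hb3, gbit]

-- the triple condition stated directly on the word
def Trip (w : List Char) : Prop :=
  ∃ j, j + 6 ≤ w.length ∧ pe w j = true ∧ pe w (j + 2) = true ∧ pe w (j + 4) = true

-- A's result characterised by Trip
lemma getP_some (w : List Char) (j : Nat) (hj : j < w.length - 1) :
    ((List.range (w.length - 1)).map (pe w))[j]? = some (pe w j) := by
  rw [List.getElem?_map, List.getElem?_range hj]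
  rfl

lemma getP_some_true (w : List Char) (j : Nat)
    (h : ((List.range (w.length - 1)).map (pe w))[j]? = some true) :
    j < w.length - 1 ∧ pe w j = true := by
  rcases Nat.lt_or_ge j (w.length - 1) with hj | hj
  · rw [getP_some w j hj, Option.some_inj] at h
    exact ⟨hj, h⟩
  · rw [List.getElem?_eq_none (by simpa using hj)] at h
    simp at h

lemma A_iff (word : String) :
    find_three_double_letter word = true ↔ Trip word.toList := by
  unfold find_three_double_letter
  set w := word.toList with hw
  have hloop : ftdlLoop w 0 []
      = ((List.range (w.length - 1)).map (pe w)).map gbit := by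
    rw [ftdlLoop_eq w (w.length - 1 - 0) 0 [] rfl]
    rw [List.range_eq_range']
    simp only [Nat.sub_zero, List.nil_append, List.map_map]
    apply List.map_congr_left
    intro a _
    by_cases h : w.getD a ' ' = w.getD (a + 1) ' ' <;> simp [gbit, pe, h]

  set P := (List.range (w.length - 1)).map (pe w) with hP
  have hPlen : P.length = w.length - 1 := by simp [hP]
  have pat1 : "10101".toList = ['1', '0', '1', '0', '1'] := rfl
  have pat2 : "11101".toList = ['1', '1', '1', '0', '1'] := rfl
  have pat3 : "10111".toList = ['1', '0', '1', '1', '1'] := rfl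
  have pat4 : "11111".toList = ['1', '1', '1', '1', '1'] := rfl
  simp only [hloop, if_bool]
  constructor
  · intro h
    simp only [Bool.or_eq_true] at h
    have key : ∃ j, j + 5 ≤ P.length ∧ P[j]? = some true ∧ P[j + 2]? = some true ∧ P[j + 4]? = some true := by
      rcases h with ((h | h) | h) | h
      · exact isIn_pattern_imp (t := "10101".toList) (by rw [pat1]; rfl) (by rw [pat1]; rfl) (by rw [pat1]; rfl) (by rw [pat1]; rfl) h
      · exact isIn_pattern_imp (t := "11101".toList) (by rw [pat2]; rfl) (by rw [pat2]; rfl) (by rw [pat2]; rfl) (by rw [pat2]; rfl) h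
      · exact isIn_pattern_imp (t := "10111".toList) (by rw [pat3]; rfl) (by rw [pat3]; rfl) (by rw [pat3]; rfl) (by rw [pat3]; rfl) h
      · exact isIn_pattern_imp (t := "11111".toList) (by rw [pat4]; rfl) (by rw [pat4]; rfl) (by rw [pat4]; rfl) (by rw [pat4]; rfl) h
    obtain ⟨j, h5, hj0, hj2, hj4⟩ := key
    rw [hPlen] at h5
    exact ⟨j, by omega, (getP_some_true w j hj0).2, (getP_some_true w (j + 2) hj2).2,
      (getP_some_true w (j + 4) hj4).2⟩
  · rintro ⟨j, hlen, h0, h2, h4⟩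
    have h5 : j + 5 ≤ P.length := by rw [hPlen]; omega
    have h0' : P[j]? = some true := by rw [hP, getP_some w j (by omega), h0]
    have h2' : P[j + 2]? = some true := by rw [hP, getP_some w (j + 2) (by omega), h2]
    have h4' : P[j + 4]? = some true := by rw [hP, getP_some w (j + 4) (by omega), h4]
    have hb1 : P[j + 1]? = some (pe w (j + 1)) := by rw [hP]; exact getP_some w (j + 1) (by omega)
    have hb3 : P[j + 3]? = some (pe w (j + 3)) := by rw [hP]; exact getP_some w (j + 3) (by omega)
    have key := trip_isIn h5 _ _ hb1 hb3 h0' h2' h4'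
    simp only [Bool.or_eq_true]
    cases hc1 : pe w (j + 1) <;> cases hc3 : pe w (j + 3) <;> rw [hc1, hc3] at key
    · exact Or.inl (Or.inl (Or.inl (by rw [pat1]; simpa [gbit] using key)))
    · exact Or.inl (Or.inr (by rw [pat3]; simpa [gbit] using key))
    · exact Or.inl (Or.inl (Or.inr (by rw [pat2]; simpa [gbit] using key)))
    · exact Or.inr (by rw [pat4]; simpa [gbit] using key)

-- ---- B side: run length of spaced doubles ending at index k ----
def chainLen (w : List Char) : Nat → Nat
  | 0 => if decide (1 < w.length) && pe w 0 then 1 else 0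
  | 1 => if decide (2 < w.length) && pe w 1 then 1 else 0
  | (k + 2) => if decide (k + 3 < w.length) && pe w (k + 2) then chainLen w k + 1 else 0

lemma chainLen_zero_of_ge (w : List Char) (k : Nat) (h : w.length ≤ k + 1) : chainLen w k = 0 := by
  match k with
  | 0 => simp [chainLen, show ¬ (1 < w.length) from by omega]
  | 1 => simp [chainLen, show ¬ (2 < w.length) from by omega]
  | (k + 2) => simp [chainLen, show ¬ (k + 3 < w.length) from by omega]

lemma chainLen_pos (w : List Char) (k : Nat) (h : 1 ≤ chainLen w k) :
    k + 2 ≤ w.length ∧ pe w k = true := by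
  rcases k with _ | _ | k <;> simp only [chainLen] at h <;> split_ifs at h with hc <;>
    simp_all <;> omega

lemma chain_ge3_iff (w : List Char) : (∃ k, 3 ≤ chainLen w k) ↔ Trip w := by
  constructor
  · rintro ⟨k, hk⟩
    rcases k with _ | _ | k
    · simp only [chainLen] at hk; split_ifs at hk <;> omega
    · simp only [chainLen] at hk; split_ifs at hk <;> omega
    · simp only [chainLen] at hk
      split_ifs at hk with hg
      · simp only [Bool.and_eq_true, decide_eq_true_eq] at hg
        have hk2 : 2 ≤ chainLen w k := by omega
        rcases k with _ | _ | k
        · simp only [chainLen] at hk2; split_ifs at hk2 <;> omega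
        · simp only [chainLen] at hk2; split_ifs at hk2 <;> omega
        · simp only [chainLen] at hk2
          split_ifs at hk2 with hg2
          · simp only [Bool.and_eq_true, decide_eq_true_eq] at hg2
            have h1 : 1 ≤ chainLen w k := by omega
            obtain ⟨hb, hpe⟩ := chainLen_pos w k h1
            exact ⟨k, by omega, hpe, hg2.2, hg.2⟩
          · omega
      · omega
  · rintro ⟨j, hlen, h0, h2, h4⟩
    refine ⟨j + 4, ?_⟩
    have e4 : chainLen w (j + 4) = chainLen w (j + 2) + 1 := by
      show (if decide (j + 2 + 3 < w.length) && pe w (j + 2 + 2) then chainLen w (j + 2) + 1 else 0)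
        = chainLen w (j + 2) + 1
      rw [if_pos]
      simp only [Bool.and_eq_true, decide_eq_true_eq]
      exact ⟨by omega, by simpa [show j + 2 + 2 = j + 4 from by omega] using h4⟩
    have e2 : chainLen w (j + 2) = chainLen w j + 1 := by
      show (if decide (j + 3 < w.length) && pe w (j + 2) then chainLen w j + 1 else 0)
        = chainLen w j + 1
      rw [if_pos]
      simp only [Bool.and_eq_true, decide_eq_true_eq]
      exact ⟨by omega, h2⟩
    have e0 : 1 ≤ chainLen w j := by
      have hg : j + 2 ≤ w.length := by omega
      match j, h0, hg with
      | 0, hpe, hg =>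
        have hcond : (decide (1 < w.length) && pe w 0) = true := by
          simp only [Bool.and_eq_true, decide_eq_true_eq]
          exact ⟨by omega, hpe⟩
        simp [chainLen, hcond]
      | 1, hpe, hg =>
        have hcond : (decide (2 < w.length) && pe w 1) = true := by
          simp only [Bool.and_eq_true, decide_eq_true_eq]
          exact ⟨by omega, hpe⟩
        simp [chainLen, hcond]
      | (k + 2), hpe, hg =>
        have hcond : (decide (k + 3 < w.length) && pe w (k + 2)) = true := by
          simp only [Bool.and_eq_true, decide_eq_true_eq]
          exact ⟨by omega, hpe⟩
        simp [chainLen, hcond]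
    omega

-- when the loop guard fails no chain anywhere has reached 3
lemma altLoop_stop (w : List Char) (i c0 c1 : Nat) (hg : ¬ i + 1 < w.length)
    (hprev : ∀ k, k < i → chainLen w k < 3) :
    altLoop w i c0 c1 = true ↔ ∃ k, 3 ≤ chainLen w k := by
  rw [altLoop, dif_neg hg]
  constructor
  · intro h; exact absurd h (by simp)
  · rintro ⟨k, hk⟩
    exfalso
    rcases Nat.lt_or_ge k i with hk' | hk'
    · have := hprev k hk'; omega
    · have := chainLen_zero_of_ge w k (by omega); omega

-- loop invariant: the chosen counter equals the chain ending two back (same parity), the other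
-- the chain ending one back, and no chain before i has reached 3
lemma altLoop_iff (w : List Char) : ∀ (d i c0 c1 : Nat),
    w.length - i = d →
    (if i % 2 == 0 then c0 else c1) = (if i < 2 then 0 else chainLen w (i - 2)) →
    (if i % 2 == 0 then c1 else c0) = (if i < 1 then 0 else chainLen w (i - 1)) →
    (∀ k, k < i → chainLen w k < 3) →
    (altLoop w i c0 c1 = true ↔ ∃ k, 3 ≤ chainLen w k) := by
  intro d
  induction d with
  | zero =>
    intro i c0 c1 hd hA hB hprev
    exact altLoop_stop w i c0 c1 (by omega) hprev
  | succ n ih =>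
    intro i c0 c1 hd hA hB hprev
    by_cases hg : i + 1 < w.length
    · rw [altLoop, dif_pos hg]
      have hc : (if w.getD i ' ' == w.getD (i + 1) ' ' then (if i % 2 == 0 then c0 else c1) + 1 else 0)
          = chainLen w i := by
        match i, hA, hg with
        | 0, hA, hg =>
          have hc0 : c0 = 0 := by simpa using hA
          simp [hc0, chainLen, pe, decide_eq_true (show 1 < w.length from hg)]
        | 1, hA, hg =>
          have hc1 : c1 = 0 := by simpa using hA
          simp [hc1, chainLen, pe, decide_eq_true (show 2 < w.length from hg)]
        | (k + 2), hA, hg =>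
          have hA' : (if ((k + 2) % 2 == 0) = true then c0 else c1) = chainLen w k := by
            rwa [if_neg (by omega : ¬ k + 2 < 2)] at hA
          rw [hA']
          simp [chainLen, pe, decide_eq_true (show k + 3 < w.length from hg)]
      have hle : chainLen w i ≤ 3 := by
        match i with
        | 0 => simp only [chainLen]; split_ifs <;> omega
        | 1 => simp only [chainLen]; split_ifs <;> omega
        | (k + 2) =>
          have := hprev k (by omega)
          simp only [chainLen]; split_ifs <;> omega
      by_cases h3 : chainLen w i = 3
      · simp only [hc, h3]
        rw [if_pos (by rfl)]
        exact ⟨fun _ => ⟨i, by omega⟩, fun _ => rfl⟩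
      · have hne : (chainLen w i == 3) = false := by simp [h3]
        simp only [hc, hne]
        rw [if_neg (by simp)]
        have hprev' : ∀ k, k < i + 1 → chainLen w k < 3 := by
          intro k hk
          rcases Nat.lt_or_ge k i with hk' | hk'
          · exact hprev k hk'
          · have hki : k = i := by omega
            subst hki
            omega
        by_cases hp : i % 2 = 0
        · have hpb : (i % 2 == 0) = true := by simp [hp]
          have hpb1 : ((i + 1) % 2 == 0) = false := by
            have h1 : (i + 1) % 2 = 1 := by omega
            simp [h1]
          rw [hpb, if_pos (by rfl)]
          rw [hpb, if_pos (by rfl)] at hB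
          have h1 : (if ((i + 1) % 2 == 0) = true then chainLen w i else c1)
              = if i + 1 < 2 then 0 else chainLen w (i + 1 - 2) := by
            rw [hpb1, if_neg (by simp)]
            rcases Nat.eq_zero_or_pos i with h0 | h0
            · subst h0; simpa using hB
            · rw [if_neg (by omega : ¬ i + 1 < 2), show i + 1 - 2 = i - 1 from by omega]
              rw [if_neg (by omega : ¬ i < 1)] at hB
              exact hB
          have h2 : (if ((i + 1) % 2 == 0) = true then c1 else chainLen w i)
              = if i + 1 < 1 then 0 else chainLen w (i + 1 - 1) := by
            rw [hpb1, if_neg (by simp), if_neg (by omega : ¬ i + 1 < 1),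
              show i + 1 - 1 = i from by omega]
          exact ih (i + 1) (chainLen w i) c1 (by omega) h1 h2 hprev'
        · have hodd : i % 2 = 1 := by omega
          have hpb : (i % 2 == 0) = false := by simp [hodd]
          have hpb1 : ((i + 1) % 2 == 0) = true := by
            have h1 : (i + 1) % 2 = 0 := by omega
            simp [h1]
          rw [hpb, if_neg (by simp)]
          rw [hpb, if_neg (by simp)] at hB
          have hi1 : 1 ≤ i := by omega
          rw [if_neg (by omega : ¬ i < 1)] at hB
          have h1 : (if ((i + 1) % 2 == 0) = true then c0 else chainLen w i)
              = if i + 1 < 2 then 0 else chainLen w (i + 1 - 2) := by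
            rw [hpb1, if_pos (by rfl), if_neg (by omega : ¬ i + 1 < 2),
              show i + 1 - 2 = i - 1 from by omega]
            exact hB
          have h2 : (if ((i + 1) % 2 == 0) = true then chainLen w i else c0)
              = if i + 1 < 1 then 0 else chainLen w (i + 1 - 1) := by
            rw [hpb1, if_pos (by rfl), if_neg (by omega : ¬ i + 1 < 1),
              show i + 1 - 1 = i from by omega]
          exact ih (i + 1) c0 (chainLen w i) (by omega) h1 h2 hprev'
    · exact altLoop_stop w i c0 c1 hg hprev

-- ===== VERDICT (by name: the statement is the Claim_ definition above) =====
theorem find_three_double_letter_spec : Claim_equal_find_three_double_letter := by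
  intro word _
  unfold Spec_find_three_double_letter
  have hA := A_iff word
  have hB : find_three_double_letter_alt word = true ↔ Trip word.toList := by
    unfold find_three_double_letter_alt
    rw [altLoop_iff word.toList (word.toList.length - 0) 0 0 0 rfl rfl rfl
      (by intro k hk; omega)]
    exact chain_ge3_iff word.toList
  cases hA' : find_three_double_letter word with
  | false =>
    cases hB' : find_three_double_letter_alt word with
    | false => rfl
    | true => exact absurd (hA.mpr (hB.mp hB')) (by simp [hA'])
  | true => exact (hB.mpr (hA.mp hA')).symm
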